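-- pv_equiv track=rewrite | github.com/TedYav/CodingChallenges | Pramp/python/grants.py | minimum_budget
-- ===== SOURCE A (Python) =====
-- def minimum_budget(grants,new_budget):
-- 	old_budget = sum(grants)
-- 	grants = sorted(grants,reverse=True)
-- 	target = old_budget - new_budget
-- 	if new_budget < 0: return None
-- 	elif target <= 0: return max(grants)
-- 	else:
-- 		total = 0
-- 		for i in range(len(grants)-1):
-- 			total += (grants[i] - grants[i+1])*(i+1)
-- 			if total > target:
-- 				return grants[i+1] + (total - target)//(i+1)
-- ===== SOURCE B (Python) =====
-- def minimum_budget(grants, new_budget):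
--     if new_budget < 0:
--         return None
--     if sum(grants) <= new_budget:
--         return max(grants)
--     lo, hi = min(grants), max(grants)
--     if len(grants) * lo > new_budget:
--         return None
--     while lo < hi:
--         mid = (lo + hi + 1) // 2
--         if sum(min(g, mid) for g in grants) <= new_budget:
--             lo = mid
--         else:
--             hi = mid - 1
--     return lo
-- ===== Notes on version B (the rewrite author's own statement) =====
-- stated objective: alternative
-- what changed: B replaces A's sort + linear telescoping scan by a binary search on the cap value itself, testing feasibility with sum(min(g,mid)) at each probe; no sort at all.
-- intended difference: On inputs with 0 <= new_budget < sum(grants) and new_budget exactly equal to len(grants)*min(grants), A's strict 'total > target' test never fires and it falls through to None, while B returns min(grants), which is intended: capping every grant at min(grants) meets the budget exactly. — e.g. on minimum_budget([3, 1], 2): A returns none, B returns some 1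
import Mathlib
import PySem

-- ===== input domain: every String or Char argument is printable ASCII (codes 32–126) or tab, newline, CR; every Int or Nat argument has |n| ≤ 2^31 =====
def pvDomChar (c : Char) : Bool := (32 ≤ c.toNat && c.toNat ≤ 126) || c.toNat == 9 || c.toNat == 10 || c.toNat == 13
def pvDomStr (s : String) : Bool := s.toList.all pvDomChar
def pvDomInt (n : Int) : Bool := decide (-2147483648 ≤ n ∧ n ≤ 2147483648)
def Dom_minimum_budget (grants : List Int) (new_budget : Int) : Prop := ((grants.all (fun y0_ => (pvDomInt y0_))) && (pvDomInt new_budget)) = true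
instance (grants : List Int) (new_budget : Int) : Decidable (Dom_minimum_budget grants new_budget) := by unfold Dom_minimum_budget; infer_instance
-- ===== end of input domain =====

-- B replaces A's descending-sort + telescoping linear scan by a binary search on the cap
-- value itself, probing feasibility with sum(min(g, mid)); a genuinely different algorithm
-- of similar cost ("alternative").

-- ===== PORT A =====
-- A's 'for i in range(len(grants)-1): total += …; if total > target: return …'
-- (fuel = number of remaining indices; the caller passes g.length, which is enough)
def pvALoop (g : List Int) (target : Int) : Nat → Nat → Int → Option Int
  | 0, _, _ => none
  | fuel + 1, i, total =>
    if i + 1 < g.length then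
      let total' := total + (g.getD i 0 - g.getD (i+1) 0) * ((i : Int) + 1)
      if total' > target then
        some (g.getD (i+1) 0 + PySem.Int.floordiv (total' - target) ((i : Int) + 1))
      else pvALoop g target fuel (i+1) total'
    else none

def minimum_budget (grants : List Int) (new_budget : Int) : Option Int :=
  let old_budget := grants.sum
  let g := PySem.List.sorted grants (fun x => x) true
  let target := old_budget - new_budget
  if new_budget < 0 then none
  else if target ≤ 0 then PySem.List.max? g (fun x => x)
  else pvALoop g target g.length 0 0

-- ===== PORT B =====
-- Source B's feasibility probe: sum(min(g, mid) for g in grants)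
def pvCapped (grants : List Int) (c : Int) : Int := (grants.map (fun g => min g c)).sum

-- Source B's 'while lo < hi' binary search on the cap value
-- (fuel = initial gap (hi-lo).toNat, enough since the gap shrinks each step)
def pvBSearch (grants : List Int) (nb : Int) : Nat → Int → Int → Int
  | 0, lo, _ => lo
  | fuel + 1, lo, hi =>
    if lo < hi then
      let mid := PySem.Int.floordiv (lo + hi + 1) 2
      if pvCapped grants mid ≤ nb then pvBSearch grants nb fuel mid hi
      else pvBSearch grants nb fuel lo (mid - 1)
    else lo

def minimum_budget_alt (grants : List Int) (new_budget : Int) : Option Int :=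
  if new_budget < 0 then none
  else if grants.sum ≤ new_budget then PySem.List.max? grants (fun x => x)
  else
    match PySem.List.min? grants (fun x => x), PySem.List.max? grants (fun x => x) with
    | some lo, some hi =>
        if (grants.length : Int) * lo > new_budget then none
        else some (pvBSearch grants new_budget (hi - lo).toNat lo hi)
    | _, _ => none   -- unreachable: empty grants has sum 0 ≤ new_budget

-- ===== PRECONDITION & SPEC =====
-- Pre_ excludes exactly the inputs on which A raises: empty grants with new_budget ≥ 0
-- (Python's max([]) raises ValueError there; B's max(grants) raises as well).
def Pre_minimum_budget (grants : List Int) (new_budget : Int) : Prop :=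
  grants ≠ [] ∨ new_budget < 0
instance (grants : List Int) (new_budget : Int) : Decidable (Pre_minimum_budget grants new_budget) := by unfold Pre_minimum_budget; infer_instance

def pvWitness_minimum_budget : List Int × Int := ([2, 100, 50, 120, 1000], 190)

-- On inputs with 0 ≤ new_budget < sum grants and new_budget = length * min, A's strict
-- 'total > target' test never fires and A returns none, while B returns some (min grants),
-- which is intended: capping every grant at the minimum meets the budget exactly.
def D_minimum_budget (grants : List Int) (new_budget : Int) : Prop :=
  0 ≤ new_budget ∧ new_budget < grants.sum ∧
    (PySem.List.min? grants (fun x => x)).map (fun m => (grants.length : Int) * m) = some new_budget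
instance (grants : List Int) (new_budget : Int) : Decidable (D_minimum_budget grants new_budget) := by unfold D_minimum_budget; infer_instance

def Spec_minimum_budget (grants : List Int) (new_budget : Int) (out : Option Int) : Prop := ¬ D_minimum_budget grants new_budget → out = minimum_budget_alt grants new_budget
instance (grants : List Int) (new_budget : Int) (out : Option Int) : Decidable (Spec_minimum_budget grants new_budget out) := by unfold Spec_minimum_budget; infer_instance

def pvDiffWitness_minimum_budget : List Int × Int := ([3, 1], 2)
def pvDiffWitnessOut_minimum_budget : (Option Int) × (Option Int) := (none, some 1)

-- ===== CLAIM (what is proved, stated in full; the proofs are below) =====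
def Claim_unchanged_minimum_budget : Prop := ∀ (grants : List Int) (new_budget : Int), Dom_minimum_budget grants new_budget → Pre_minimum_budget grants new_budget → Spec_minimum_budget grants new_budget (minimum_budget grants new_budget)
def Claim_changed_minimum_budget : Prop := Dom_minimum_budget (pvDiffWitness_minimum_budget.1) (pvDiffWitness_minimum_budget.2) ∧ Pre_minimum_budget (pvDiffWitness_minimum_budget.1) (pvDiffWitness_minimum_budget.2) ∧ D_minimum_budget (pvDiffWitness_minimum_budget.1) (pvDiffWitness_minimum_budget.2) ∧ minimum_budget (pvDiffWitness_minimum_budget.1) (pvDiffWitness_minimum_budget.2) = pvDiffWitnessOut_minimum_budget.1 ∧ minimum_budget_alt (pvDiffWitness_minimum_budget.1) (pvDiffWitness_minimum_budget.2) = pvDiffWitnessOut_minimum_budget.2 ∧ pvDiffWitnessOut_minimum_budget.1 ≠ pvDiffWitnessOut_minimum_budget.2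
def Claim_exact_minimum_budget : Prop := ∀ (grants : List Int) (new_budget : Int), Dom_minimum_budget grants new_budget → Pre_minimum_budget grants new_budget → D_minimum_budget grants new_budget → minimum_budget grants new_budget ≠ minimum_budget_alt grants new_budget

-- ===== LEMMAS AND PROOFS =====

-- capped sum is monotone in the cap
lemma pv_csum_mono (g : List Int) {c d : Int} (h : c ≤ d) : pvCapped g c ≤ pvCapped g d := by
  unfold pvCapped
  exact List.sum_le_sum (fun x _ => min_le_min_left x h)

-- cap above everything: capped sum is the plain sum
lemma pv_csum_of_ge (g : List Int) {c : Int} (h : ∀ x ∈ g, x ≤ c) : pvCapped g c = g.sum := by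
  unfold pvCapped
  rw [List.map_congr_left (fun x hx => min_eq_left (h x hx)), List.map_id']

-- cap below everything: capped sum is length * cap
lemma pv_csum_of_le (g : List Int) {c : Int} (h : ∀ x ∈ g, c ≤ x) :
    pvCapped g c = (g.length : Int) * c := by
  unfold pvCapped
  rw [List.map_congr_left (fun x hx => min_eq_right (h x hx))]
  simp [List.map_const', mul_comm]

-- split formula: first k elements ≥ c, rest ≤ c
lemma pv_csum_split (g : List Int) (k : Nat) (c : Int) (hk : k ≤ g.length)
    (h1 : ∀ x ∈ g.take k, c ≤ x) (h2 : ∀ x ∈ g.drop k, x ≤ c) :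
    pvCapped g c = (k : Int) * c + (g.drop k).sum := by
  unfold pvCapped
  conv_lhs => rw [← List.take_append_drop k g]
  rw [List.map_append, List.sum_append,
    List.map_congr_left (fun x hx => min_eq_right (h1 x hx)),
    List.map_congr_left (fun x hx => min_eq_left (h2 x hx)), List.map_id']
  simp [List.map_const', Nat.min_eq_left hk, mul_comm]

-- strictly larger capped sum one step up, when some element exceeds the cap
lemma pv_csum_succ_lt (g : List Int) {c : Int} (h : ∃ x ∈ g, c < x) :
    pvCapped g c < pvCapped g (c + 1) := by
  unfold pvCapped
  obtain ⟨x, hx, hcx⟩ := h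
  exact List.sum_lt_sum _ _ (fun y _ => min_le_min_left y (by omega))
    ⟨x, hx, by rw [min_eq_right (by omega : c ≤ x), min_eq_right (by omega : c + 1 ≤ x)]; omega⟩

-- the cap with csum ≤ nb < csum (·+1) is unique
lemma pv_csum_unique (g : List Int) {nb a b : Int}
    (ha1 : pvCapped g a ≤ nb) (ha2 : nb < pvCapped g (a + 1))
    (hb1 : pvCapped g b ≤ nb) (hb2 : nb < pvCapped g (b + 1)) : a = b := by
  rcases lt_trichotomy a b with h | h | h
  · have := pv_csum_mono g (show a + 1 ≤ b by omega)
    omega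
  · exact h
  · have := pv_csum_mono g (show b + 1 ≤ a by omega)
    omega

-- elementwise monotone access in a descending-sorted list
lemma pv_sorted_getD_le (g : List Int) (hpw : g.Pairwise (fun a b => b ≤ a))
    {j k : Nat} (hjk : j ≤ k) (hk : k < g.length) : g.getD k 0 ≤ g.getD j 0 := by
  rcases Nat.eq_or_lt_of_le hjk with rfl | hlt
  · exact le_refl _
  · rw [List.getD_eq_getElem g 0 hk, List.getD_eq_getElem g 0 (by omega)]
    exact List.pairwise_iff_getElem.mp hpw j k (by omega) hk hlt

lemma pv_sorted_mem_ge_last (g : List Int) (hpw : g.Pairwise (fun a b => b ≤ a)) :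
    ∀ x ∈ g, g.getD (g.length - 1) 0 ≤ x := by
  intro x hx
  obtain ⟨j, hj, rfl⟩ := List.mem_iff_getElem.mp hx
  rw [← List.getD_eq_getElem g 0 hj]
  exact pv_sorted_getD_le g hpw (by omega) (by omega)

-- csum of a descending-sorted list at its k-th element
lemma pv_csum_at_sorted (g : List Int) (hpw : g.Pairwise (fun a b => b ≤ a))
    (k : Nat) (hk : k < g.length) :
    pvCapped g (g.getD k 0) = ((k : Int) + 1) * g.getD k 0 + (g.drop (k+1)).sum := by
  have h := pv_csum_split g (k+1) (g.getD k 0) (by omega)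
    (by
      intro x hx
      obtain ⟨j, hj, rfl⟩ := List.mem_iff_getElem.mp hx
      rw [List.getElem_take, ← List.getD_eq_getElem g 0 (by simp at hj; omega)]
      exact pv_sorted_getD_le g hpw (by simp at hj; omega) hk)
    (by
      intro x hx
      obtain ⟨j, hj, rfl⟩ := List.mem_iff_getElem.mp hx
      rw [List.getElem_drop, ← List.getD_eq_getElem g 0 (by simp at hj; omega)]
      exact pv_sorted_getD_le g hpw (by omega) (by simp at hj; omega))
  rw [h]
  push_cast
  ring

-- csum for a cap between two adjacent elements of a descending-sorted list
lemma pv_csum_between (g : List Int) (hpw : g.Pairwise (fun a b => b ≤ a))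
    (k : Nat) (hk : k + 1 < g.length) (c : Int)
    (h1 : g.getD (k+1) 0 ≤ c) (h2 : c ≤ g.getD k 0) :
    pvCapped g c = ((k : Int) + 1) * c + (g.drop (k+1)).sum := by
  have h := pv_csum_split g (k+1) c (by omega)
    (by
      intro x hx
      obtain ⟨j, hj, rfl⟩ := List.mem_iff_getElem.mp hx
      rw [List.getElem_take, ← List.getD_eq_getElem g 0 (by simp at hj; omega)]
      exact le_trans h2 (pv_sorted_getD_le g hpw (by simp at hj; omega) (by omega)))
    (by
      intro x hx
      obtain ⟨j, hj, rfl⟩ := List.mem_iff_getElem.mp hx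
      rw [List.getElem_drop, ← List.getD_eq_getElem g 0 (by simp at hj; omega)]
      exact le_trans (pv_sorted_getD_le g hpw (by omega) (by simp at hj; omega)) h1)
  rw [h]
  push_cast
  ring

-- A's loop: if it returns some r then r is the unique threshold cap; if none, nb ≤ csum(min)
lemma pv_aloop_spec (g : List Int) (nb : Int) (hpw : g.Pairwise (fun a b => b ≤ a))
    (hnb : nb < g.sum) :
    ∀ fuel i total, g.length ≤ fuel + i → i + 1 ≤ g.length →
      total = g.sum - pvCapped g (g.getD i 0) → total ≤ g.sum - nb →
      (∀ r, pvALoop g (g.sum - nb) fuel i total = some r →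
        pvCapped g r ≤ nb ∧ nb < pvCapped g (r + 1)) ∧
      (pvALoop g (g.sum - nb) fuel i total = none → nb ≤ pvCapped g (g.getD (g.length - 1) 0)) := by
  intro fuel
  induction fuel with
  | zero => intro i total hfi hi htot hle; exact (by omega : False).elim
  | succ fuel ih =>
    intro i total hfi hi htot hle
    simp only [pvALoop]
    by_cases hlt : i + 1 < g.length
    · rw [if_pos hlt]
      have hpos : (0 : Int) < (i : Int) + 1 := by positivity
      have hcsi := pv_csum_at_sorted g hpw i (by omega)
      have hcsi1 := pv_csum_at_sorted g hpw (i+1) hlt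
      have hdropsum : (g.drop (i+1)).sum = g.getD (i+1) 0 + (g.drop (i+2)).sum := by
        rw [List.drop_eq_getElem_cons hlt, List.sum_cons, List.getD_eq_getElem g 0 hlt]
      have hdiff : pvCapped g (g.getD i 0) - pvCapped g (g.getD (i+1) 0)
          = ((i : Int) + 1) * (g.getD i 0 - g.getD (i+1) 0) := by
        rw [hcsi, hcsi1, hdropsum]; push_cast; ring
      have htot' : total + (g.getD i 0 - g.getD (i+1) 0) * ((i : Int) + 1)
          = g.sum - pvCapped g (g.getD (i+1) 0) := by
        rw [htot]; linarith [hdiff]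
      by_cases htr : total + (g.getD i 0 - g.getD (i+1) 0) * ((i : Int) + 1) > g.sum - nb
      · rw [if_pos htr]
        refine ⟨?_, by intro h; exact absurd h (by simp)⟩
        intro r hr
        injection hr with hr
        subst hr
        have hc1le : g.getD (i+1) 0 ≤ g.getD i 0 :=
          pv_sorted_getD_le g hpw (by omega) hlt
        set c1 := g.getD (i+1) 0 with hc1
        set q := PySem.Int.floordiv
          (total + (g.getD i 0 - c1) * ((i : Int) + 1) - (g.sum - nb)) ((i : Int) + 1) with hq
        have hT : total + (g.getD i 0 - c1) * ((i : Int) + 1) - (g.sum - nb)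
            = nb - pvCapped g c1 := by linarith [htot']
        have hql : q * ((i : Int) + 1)
            ≤ total + (g.getD i 0 - c1) * ((i : Int) + 1) - (g.sum - nb) :=
          (PySem.Int.le_floordiv_iff_mul_le hpos).mp (le_refl q)
        have hqu : total + (g.getD i 0 - c1) * ((i : Int) + 1) - (g.sum - nb)
            < (q + 1) * ((i : Int) + 1) :=
          (PySem.Int.floordiv_lt_iff_lt_mul hpos).mp (lt_add_one q)
        have hq0 : 0 ≤ q :=
          (PySem.Int.le_floordiv_iff_mul_le hpos).mpr (by linarith)
        have hnbi : nb ≤ pvCapped g (g.getD i 0) := by linarith [htot, hle]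
        have hqΔ : q ≤ g.getD i 0 - c1 := by
          have hm : q * ((i : Int) + 1) ≤ (g.getD i 0 - c1) * ((i : Int) + 1) := by
            linarith [hql, hT, hdiff]
          exact le_of_mul_le_mul_right hm hpos
        have hbet := pv_csum_between g hpw i hlt
        have hcsr : pvCapped g (c1 + q) = ((i : Int) + 1) * (c1 + q) + (g.drop (i+1)).sum :=
          hbet (c1 + q) (by omega) (by omega)
        have hcsc1 : pvCapped g c1 = ((i : Int) + 1) * c1 + (g.drop (i+1)).sum :=
          hbet c1 (le_refl c1) hc1le
        have h1 : pvCapped g (c1 + q) ≤ nb := by nlinarith [hcsr, hcsc1, hql, hT]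
        refine ⟨h1, ?_⟩
        by_cases hr1 : c1 + q + 1 ≤ g.getD i 0
        · have hcsr1 : pvCapped g (c1 + q + 1)
              = ((i : Int) + 1) * (c1 + q + 1) + (g.drop (i+1)).sum :=
            hbet (c1 + q + 1) (by omega) hr1
          nlinarith [hcsr1, hcsc1, hqu, hT]
        · have hreq : c1 + q = g.getD i 0 := by omega
          by_cases hex : ∃ x ∈ g, g.getD i 0 < x
          · have hsucc := pv_csum_succ_lt g hex
            rw [hreq]
            rw [hreq] at h1
            linarith [hnbi]
          · have hex : ∀ x ∈ g, x ≤ g.getD i 0 :=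
              fun x hx => le_of_not_gt (fun hgt => hex ⟨x, hx, hgt⟩)
            have := pv_csum_of_ge g hex
            rw [hreq] at h1
            linarith [hnb]
      · rw [if_neg htr]
        exact ih (i+1) _ (by omega) (by omega) htot' (by linarith [htot', htr])
    · rw [if_neg hlt]
      refine ⟨by intro r hr; exact absurd hr (by simp), ?_⟩
      intro _
      have : i = g.length - 1 := by omega
      rw [← this]
      linarith [htot, hle]

-- A's loop never fires when even the minimum cap is not below budget
lemma pv_aloop_none (g : List Int) (nb : Int) (hpw : g.Pairwise (fun a b => b ≤ a))
    (hmin : nb ≤ pvCapped g (g.getD (g.length - 1) 0)) :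
    ∀ fuel i total, i + 1 ≤ g.length →
      total = g.sum - pvCapped g (g.getD i 0) →
      pvALoop g (g.sum - nb) fuel i total = none := by
  intro fuel
  induction fuel with
  | zero => intro i total hi htot; rfl
  | succ fuel ih =>
    intro i total hi htot
    simp only [pvALoop]
    by_cases hlt : i + 1 < g.length
    · rw [if_pos hlt]
      have hcsi := pv_csum_at_sorted g hpw i (by omega)
      have hcsi1 := pv_csum_at_sorted g hpw (i+1) hlt
      have hdropsum : (g.drop (i+1)).sum = g.getD (i+1) 0 + (g.drop (i+2)).sum := by
        rw [List.drop_eq_getElem_cons hlt, List.sum_cons, List.getD_eq_getElem g 0 hlt]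
      have hdiff : pvCapped g (g.getD i 0) - pvCapped g (g.getD (i+1) 0)
          = ((i : Int) + 1) * (g.getD i 0 - g.getD (i+1) 0) := by
        rw [hcsi, hcsi1, hdropsum]; push_cast; ring
      have htot' : total + (g.getD i 0 - g.getD (i+1) 0) * ((i : Int) + 1)
          = g.sum - pvCapped g (g.getD (i+1) 0) := by
        rw [htot]; linarith [hdiff]
      have hmono : pvCapped g (g.getD (g.length - 1) 0) ≤ pvCapped g (g.getD (i+1) 0) :=
        pv_csum_mono g (pv_sorted_getD_le g hpw (by omega) (by omega))
      rw [if_neg (by linarith [hmin, hmono, htot'])]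
      exact ih (i+1) _ (by omega) htot'
    · rw [if_neg hlt]

-- B's binary search returns the unique threshold cap
lemma pv_bsearch_spec (g : List Int) (nb : Int) :
    ∀ fuel (lo hi : Int), (hi - lo).toNat ≤ fuel → lo ≤ hi →
      pvCapped g lo ≤ nb → nb < pvCapped g (hi + 1) →
      pvCapped g (pvBSearch g nb fuel lo hi) ≤ nb ∧ nb < pvCapped g (pvBSearch g nb fuel lo hi + 1) := by
  intro fuel
  induction fuel with
  | zero =>
    intro lo hi hfuel hle h1 h2
    have : lo = hi := by omega
    subst this
    exact ⟨h1, by simpa using h2⟩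
  | succ fuel ih =>
    intro lo hi hfuel hle h1 h2
    simp only [pvBSearch]
    by_cases hlt : lo < hi
    · rw [if_pos hlt]
      have hb := PySem.Int.floordiv_two_mid_bounds (lo := lo + 1) (hi := hi) (by omega)
      rw [show (lo + 1) + hi = lo + hi + 1 by ring] at hb
      by_cases hf : pvCapped g (PySem.Int.floordiv (lo + hi + 1) 2) ≤ nb
      · rw [if_pos hf]
        exact ih _ hi (by omega) (by omega) hf h2
      · rw [if_neg hf]
        refine ih lo _ (by omega) (by omega) h1 ?_
        rw [show PySem.Int.floordiv (lo + hi + 1) 2 - 1 + 1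
              = PySem.Int.floordiv (lo + hi + 1) 2 by ring]
        omega
    · rw [if_neg hlt]
      have : lo = hi := by omega
      subst this
      exact ⟨h1, by simpa using h2⟩


-- the last element of the descending sort is min(grants)
lemma pv_sorted_last_eq_min (grants : List Int) (lo : Int)
    (hlo : PySem.List.min? grants (fun x => x) = some lo) :
    (PySem.List.sorted grants (fun x => x) true).getD
      ((PySem.List.sorted grants (fun x => x) true).length - 1) 0 = lo := by
  have hperm : (PySem.List.sorted grants (fun x => x) true).Perm grants :=
    PySem.List.sorted_perm grants (fun x => x) true
  have hpw := PySem.List.sorted_pairwise_rev grants (fun x => x)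
  have hne : grants ≠ [] := List.ne_nil_of_mem (PySem.List.min?_mem hlo)
  have hgpos : 0 < (PySem.List.sorted grants (fun x => x) true).length := by
    rw [hperm.length_eq]; exact List.length_pos_of_ne_nil hne
  have hlast_mem : (PySem.List.sorted grants (fun x => x) true).getD
      ((PySem.List.sorted grants (fun x => x) true).length - 1) 0 ∈ grants := by
    rw [List.getD_eq_getElem _ 0 (by omega)]
    exact hperm.subset (List.getElem_mem _)
  exact le_antisymm
    (pv_sorted_mem_ge_last _ hpw lo (hperm.mem_iff.mpr (PySem.List.min?_mem hlo)))
    (PySem.List.min?_isMin hlo _ hlast_mem)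

-- capping the descending sort at its first element changes nothing
lemma pv_sorted_csfirst (grants : List Int) :
    pvCapped (PySem.List.sorted grants (fun x => x) true)
        ((PySem.List.sorted grants (fun x => x) true).getD 0 0)
      = (PySem.List.sorted grants (fun x => x) true).sum := by
  have hpw := PySem.List.sorted_pairwise_rev grants (fun x => x)
  refine pv_csum_of_ge _ ?_
  intro x hx
  obtain ⟨j, hj, rfl⟩ := List.mem_iff_getElem.mp hx
  rw [← List.getD_eq_getElem _ 0 hj]
  exact pv_sorted_getD_le _ hpw (Nat.zero_le j) hj

-- A returns none whenever new_budget ≤ length * min (even the minimum cap is not under budget)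
lemma pv_A_none (grants : List Int) (nb lo : Int) (h0 : ¬ nb < 0) (hlt : nb < grants.sum)
    (hlo : PySem.List.min? grants (fun x => x) = some lo)
    (hmin : nb ≤ (grants.length : Int) * lo) :
    minimum_budget grants nb = none := by
  have hlomin := PySem.List.min?_isMin hlo
  simp only [minimum_budget]
  rw [if_neg h0, if_neg (by omega : ¬ (grants.sum - nb ≤ 0))]
  have hperm : (PySem.List.sorted grants (fun x => x) true).Perm grants :=
    PySem.List.sorted_perm grants (fun x => x) true
  have hpw := PySem.List.sorted_pairwise_rev grants (fun x => x)
  have hne : grants ≠ [] := List.ne_nil_of_mem (PySem.List.min?_mem hlo)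
  have hgpos : 0 < (PySem.List.sorted grants (fun x => x) true).length := by
    rw [hperm.length_eq]; exact List.length_pos_of_ne_nil hne
  have hsum : (PySem.List.sorted grants (fun x => x) true).sum = grants.sum := hperm.sum_eq
  have hmin' : nb ≤ pvCapped (PySem.List.sorted grants (fun x => x) true)
      ((PySem.List.sorted grants (fun x => x) true).getD
        ((PySem.List.sorted grants (fun x => x) true).length - 1) 0) := by
    rw [pv_sorted_last_eq_min grants lo hlo]
    have : pvCapped (PySem.List.sorted grants (fun x => x) true) lo = pvCapped grants lo :=
      (hperm.map _).sum_eq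
    rw [this, pv_csum_of_le grants hlomin]
    exact hmin
  rw [show grants.sum - nb = (PySem.List.sorted grants (fun x => x) true).sum - nb from by omega]
  exact pv_aloop_none _ nb hpw hmin' _ 0 0 (by omega) (by rw [pv_sorted_csfirst grants]; ring)

-- ===== VERDICT (by name: the statements are the Claim_ definitions above) =====
theorem minimum_budget_spec : Claim_unchanged_minimum_budget := by
  intro grants nb _ hpre
  unfold Spec_minimum_budget
  intro hnd
  by_cases h1 : nb < 0
  · simp only [minimum_budget, minimum_budget_alt]
    rw [if_pos h1, if_pos h1]
  · have hne : grants ≠ [] := hpre.resolve_right h1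
    have hperm : (PySem.List.sorted grants (fun x => x) true).Perm grants :=
      PySem.List.sorted_perm grants (fun x => x) true
    by_cases h2 : grants.sum ≤ nb
    · simp only [minimum_budget, minimum_budget_alt]
      rw [if_neg h1, if_neg h1, if_pos (by omega : grants.sum - nb ≤ 0), if_pos h2]
      obtain ⟨a, ha⟩ : ∃ a, PySem.List.max? (PySem.List.sorted grants (fun x => x) true)
          (fun x => x) = some a := by
        cases h : PySem.List.max? (PySem.List.sorted grants (fun x => x) true) (fun x => x) with
        | none =>
          exact absurd (List.nil_perm.mp
            (((PySem.List.max?_eq_none_iff _ _).mp h) ▸ hperm)) hne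
        | some a => exact ⟨a, rfl⟩
      obtain ⟨b, hb⟩ : ∃ b, PySem.List.max? grants (fun x => x) = some b := by
        cases h : PySem.List.max? grants (fun x => x) with
        | none => exact absurd ((PySem.List.max?_eq_none_iff _ _).mp h) hne
        | some b => exact ⟨b, rfl⟩
      rw [ha, hb]
      exact congrArg some (le_antisymm
        (PySem.List.max?_isMax hb a (hperm.subset (PySem.List.max?_mem ha)))
        (PySem.List.max?_isMax ha b (hperm.mem_iff.mpr (PySem.List.max?_mem hb))))
    · obtain ⟨lo, hlo⟩ : ∃ lo, PySem.List.min? grants (fun x => x) = some lo := by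
        cases h : PySem.List.min? grants (fun x => x) with
        | none => exact absurd ((PySem.List.min?_eq_none_iff _ _).mp h) hne
        | some lo => exact ⟨lo, rfl⟩
      obtain ⟨hi, hhi⟩ : ∃ hi, PySem.List.max? grants (fun x => x) = some hi := by
        cases h : PySem.List.max? grants (fun x => x) with
        | none => exact absurd ((PySem.List.max?_eq_none_iff _ _).mp h) hne
        | some hi => exact ⟨hi, rfl⟩
      have hlomin := PySem.List.min?_isMin hlo
      have hhimax := PySem.List.max?_isMax hhi
      by_cases h3 : (grants.length : Int) * lo > nb
      · rw [pv_A_none grants nb lo h1 (by omega) hlo (le_of_lt h3)]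
        simp only [minimum_budget_alt]
        rw [if_neg h1, if_neg h2]
        simp only [hlo, hhi]
        rw [if_pos h3]
      · have h3' : (grants.length : Int) * lo < nb := by
          rcases lt_trichotomy ((grants.length : Int) * lo) nb with h | h | h
          · exact h
          · exact absurd (hnd ⟨by omega, by omega, by rw [hlo]; simpa using h⟩) not_false
          · exact absurd h h3
        simp only [minimum_budget, minimum_budget_alt]
        rw [if_neg h1, if_neg h1, if_neg (by omega : ¬ (grants.sum - nb ≤ 0)), if_neg h2]
        simp only [hlo, hhi]
        rw [if_neg h3]
        have hpw := PySem.List.sorted_pairwise_rev grants (fun x => x)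
        have hsum : (PySem.List.sorted grants (fun x => x) true).sum = grants.sum := hperm.sum_eq
        have hgpos : 0 < (PySem.List.sorted grants (fun x => x) true).length := by
          rw [hperm.length_eq]; exact List.length_pos_of_ne_nil hne
        have hcs : ∀ c, pvCapped (PySem.List.sorted grants (fun x => x) true) c
            = pvCapped grants c := fun c => (hperm.map _).sum_eq
        have hAL := pv_aloop_spec (PySem.List.sorted grants (fun x => x) true) nb hpw
          (by rw [hsum]; omega) (PySem.List.sorted grants (fun x => x) true).length 0 0
          (by omega) (by omega)
          (by rw [pv_sorted_csfirst grants]; ring)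
          (by rw [hsum]; omega)
        have hBS := pv_bsearch_spec grants nb (hi - lo).toNat lo hi (le_refl _)
          (hlomin hi (PySem.List.max?_mem hhi))
          (by rw [pv_csum_of_le grants hlomin]; exact le_of_lt h3')
          (by
            rw [pv_csum_of_ge grants (fun x hx => by have := hhimax x hx; omega)]
            omega)
        rw [show grants.sum - nb
            = (PySem.List.sorted grants (fun x => x) true).sum - nb from by omega]
        cases hres : pvALoop (PySem.List.sorted grants (fun x => x) true)
            ((PySem.List.sorted grants (fun x => x) true).sum - nb)
            (PySem.List.sorted grants (fun x => x) true).length 0 0 with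
        | none =>
          exfalso
          have hcon := hAL.2 hres
          rw [pv_sorted_last_eq_min grants lo hlo, hcs lo,
            pv_csum_of_le grants hlomin] at hcon
          omega
        | some r =>
          have hchar := hAL.1 r hres
          rw [pv_csum_unique grants (nb := nb) (a := r)
            (b := pvBSearch grants nb (hi - lo).toNat lo hi)
            (by rw [← hcs r]; exact hchar.1)
            (by rw [← hcs (r+1)]; exact hchar.2) hBS.1 hBS.2]

theorem minimum_budget_changed : Claim_changed_minimum_budget := by
  unfold Claim_changed_minimum_budget; decide

theorem minimum_budget_tight : Claim_exact_minimum_budget := by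
  intro grants nb _ hpre hd
  obtain ⟨hnb0, hlt, hmap⟩ := hd
  cases hlo : PySem.List.min? grants (fun x => x) with
  | none => rw [hlo] at hmap; exact absurd hmap (by simp)
  | some lo =>
    rw [hlo, Option.map_some] at hmap
    have hmap' : (grants.length : Int) * lo = nb := Option.some.inj hmap
    rw [pv_A_none grants nb lo (by omega) hlt hlo (le_of_eq hmap'.symm)]
    have hne : grants ≠ [] := List.ne_nil_of_mem (PySem.List.min?_mem hlo)
    obtain ⟨hi, hhi⟩ : ∃ hi, PySem.List.max? grants (fun x => x) = some hi := by
      cases h : PySem.List.max? grants (fun x => x) with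
      | none => exact absurd ((PySem.List.max?_eq_none_iff _ _).mp h) hne
      | some hi => exact ⟨hi, rfl⟩
    simp only [minimum_budget_alt]
    rw [if_neg (by omega), if_neg (by omega : ¬ (grants.sum ≤ nb))]
    simp only [hlo, hhi]
    rw [if_neg (by rw [hmap']; exact lt_irrefl nb)]
    simp
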